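-- pv_equiv track=rewrite | github.com/tharshihecker/Smart-Ocean-Navigation-Assistant | backend/services/enhanced_ai_chat_service.py | _prioritize_search_queries
-- ===== SOURCE A (Python) =====
-- from typing import Dict, List, Optional, Any, Tuple
--
-- def _prioritize_search_queries(queries: List[str], original_query: str) -> List[str]:
--     """Prioritize search queries based on original query content for maximum relevance"""
--     prioritized = []
--     medium_priority = []
--     low_priority = []
--
--     for query in queries:
--         query_lower = query.lower()
--
--         # High priority: Direct matches with original query terms
--         if any(word in query_lower for word in original_query.split() if len(word) > 3):
--             prioritized.append(query)
--         # Medium priority: Contains relevant keywords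
--         elif any(word in query_lower for word in ['current', 'latest', 'today', '2025', 'alert', 'emergency']):
--             medium_priority.append(query)
--         # Low priority: General searches
--         else:
--             low_priority.append(query)
--
--     return prioritized + medium_priority + low_priority
-- ===== SOURCE B (Python) =====
-- def _prioritize_search_queries(queries, original_query):
--     """Stable sort by a 3-valued priority key instead of partitioning into buckets."""
--     terms = [w for w in original_query.split() if len(w) > 3]
--     keywords = ('current', 'latest', 'today', '2025', 'alert', 'emergency')
--
--     def tier(query):
--         ql = query.lower()
--         if any(w in ql for w in terms):
--             return 0
--         if any(k in ql for k in keywords):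
--             return 1
--         return 2
--
--     return sorted(queries, key=tier)
-- ===== Notes on version B (the rewrite author's own statement) =====
-- stated objective: idiomatic
-- what changed: Replaces the three explicit accumulator buckets and their concatenation with a single stable sorted() call keyed by an integer tier function (0/1/2), hoisting the long-term list out of the loop and relying on sort stability for within-tier order.
import Mathlib
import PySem

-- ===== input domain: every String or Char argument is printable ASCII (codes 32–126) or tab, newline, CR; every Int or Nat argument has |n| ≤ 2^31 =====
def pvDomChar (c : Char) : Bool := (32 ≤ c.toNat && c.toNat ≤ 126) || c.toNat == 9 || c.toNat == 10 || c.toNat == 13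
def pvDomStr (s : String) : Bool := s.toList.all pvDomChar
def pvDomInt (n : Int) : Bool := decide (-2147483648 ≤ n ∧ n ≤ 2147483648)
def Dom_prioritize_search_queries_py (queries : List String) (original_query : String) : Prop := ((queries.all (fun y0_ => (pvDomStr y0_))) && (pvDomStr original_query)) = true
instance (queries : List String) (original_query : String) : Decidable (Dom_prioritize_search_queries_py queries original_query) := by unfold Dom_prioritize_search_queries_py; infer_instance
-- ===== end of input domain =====

-- B replaces A's three accumulator buckets with a stable sorted() keyed by an integer tier (idiomatic).

-- ===== PORT A =====
-- A: one pass, appending each query to one of three buckets, then concatenating them.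
def prioritize_search_queries_py (queries : List String) (original_query : String) : List String :=
  let res := queries.foldl
    (fun (acc : List String × List String × List String) query =>
      let query_lower := PySem.Str.lower query
      if ((PySem.Str.split₀ original_query).filter (fun word => decide (3 < PySem.Str.len word))).any
           (fun word => PySem.Str.isIn word query_lower) then
        (acc.1 ++ [query], acc.2.1, acc.2.2)
      else if (["current", "latest", "today", "2025", "alert", "emergency"]).any
           (fun word => PySem.Str.isIn word query_lower) then
        (acc.1, acc.2.1 ++ [query], acc.2.2)
      else
        (acc.1, acc.2.1, acc.2.2 ++ [query]))
    ([], [], [])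
  res.1 ++ res.2.1 ++ res.2.2

-- ===== PORT B =====
-- B-side helper: the 3-valued priority key (0 = matches a long original-query term, 1 = medium keyword, 2 = rest).
def pvTier (terms : List String) (query : String) : Int :=
  if terms.any (fun w => PySem.Str.isIn w (PySem.Str.lower query)) then 0
  else if (["current", "latest", "today", "2025", "alert", "emergency"]).any
       (fun k => PySem.Str.isIn k (PySem.Str.lower query)) then 1
  else 2

def prioritize_search_queries_py_alt (queries : List String) (original_query : String) : List String :=
  let terms := (PySem.Str.split₀ original_query).filter (fun w => decide (3 < PySem.Str.len w))
  PySem.List.sorted queries (pvTier terms) false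

-- ===== PRECONDITION & SPEC =====
def Spec_prioritize_search_queries_py (queries : List String) (original_query : String) (out : List String) : Prop := out = prioritize_search_queries_py_alt queries original_query
instance (queries : List String) (original_query : String) (out : List String) : Decidable (Spec_prioritize_search_queries_py queries original_query out) := by unfold Spec_prioritize_search_queries_py; infer_instance

-- ===== CLAIM (what is proved, stated in full; the proofs are below) =====
def Claim_equal_prioritize_search_queries_py : Prop := ∀ (queries : List String) (original_query : String), Dom_prioritize_search_queries_py queries original_query → Spec_prioritize_search_queries_py queries original_query (prioritize_search_queries_py queries original_query)

-- ===== LEMMAS AND PROOFS =====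

-- Inserting x into a stably ordered list: it passes the prefix (nothing strictly after x) and lands before the suffix.
theorem pv_insertBy_append {α : Type} (before : α → α → Bool) (x : α) (as bs : List α)
    (ha : ∀ a ∈ as, before x a = false) (hb : ∀ b ∈ bs, before x b = true) :
    PySem.List.insertBy before x (as ++ bs) = as ++ x :: bs := by
  induction as with
  | nil =>
    cases bs with
    | nil => simp [PySem.List.insertBy]
    | cons b bs' =>
      simp [PySem.List.insertBy, hb b (by simp)]
  | cons a as' ih =>
    have hfa : before x a = false := ha a (by simp)
    simp [PySem.List.insertBy, hfa]
    exact ih (fun a' h => ha a' (by simp [h]))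

-- Stable sort by a {0,1,2}-valued key is the concatenation of the three tier filters, in order.
theorem pv_sorted_tier {α : Type} (key : α → Int) (hk : ∀ x, key x = 0 ∨ key x = 1 ∨ key x = 2)
    (xs : List α) :
    PySem.List.sorted xs key false =
      xs.filter (fun a => key a == 0) ++ xs.filter (fun a => key a == 1) ++ xs.filter (fun a => key a == 2) := by
  induction xs using List.reverseRecOn with
  | nil => simp [PySem.List.sorted]
  | append_singleton xs x ih =>
    have hstep : PySem.List.sorted (xs ++ [x]) key false =
        PySem.List.insertBy (fun a b => decide (key a < key b)) x (PySem.List.sorted xs key false) := by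
      simp [PySem.List.sorted, List.foldl_append]
    rw [hstep, ih]
    have mem0 : ∀ a ∈ xs.filter (fun a => key a == 0), key a = 0 := by
      intro a ha; simpa using (List.mem_filter.mp ha).2
    have mem1 : ∀ a ∈ xs.filter (fun a => key a == 1), key a = 1 := by
      intro a ha; simpa using (List.mem_filter.mp ha).2
    have mem2 : ∀ a ∈ xs.filter (fun a => key a == 2), key a = 2 := by
      intro a ha; simpa using (List.mem_filter.mp ha).2
    rcases hk x with h0 | h1 | h2
    · rw [List.append_assoc,
        pv_insertBy_append _ x _ _
          (by intro a ha; have := mem0 a ha; simp [h0, this])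
          (by intro b hb
              rcases List.mem_append.mp hb with hb | hb
              · have := mem1 b hb; simp [h0, this]
              · have := mem2 b hb; simp [h0, this])]
      simp [List.filter_append, h0]
    · rw [pv_insertBy_append _ x _ _
          (by intro a ha
              rcases List.mem_append.mp ha with ha | ha
              · have := mem0 a ha; simp [h1, this]
              · have := mem1 a ha; simp [h1, this])
          (by intro b hb; have := mem2 b hb; simp [h1, this])]
      simp [List.filter_append, h1]
    · rw [show xs.filter (fun a => key a == 0) ++ xs.filter (fun a => key a == 1) ++ xs.filter (fun a => key a == 2)
            = (xs.filter (fun a => key a == 0) ++ xs.filter (fun a => key a == 1) ++ xs.filter (fun a => key a == 2)) ++ [] by simp,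
        pv_insertBy_append _ x _ _
          (by intro a ha
              rcases List.mem_append.mp ha with ha | ha
              · rcases List.mem_append.mp ha with ha | ha
                · have := mem0 a ha; simp [h2, this]
                · have := mem1 a ha; simp [h2, this]
              · have := mem2 a ha; simp [h2, this])
          (by intro b hb; simp at hb)]
      simp [List.filter_append, h2]

theorem pvTier_range (terms : List String) (q : String) :
    pvTier terms q = 0 ∨ pvTier terms q = 1 ∨ pvTier terms q = 2 := by
  unfold pvTier
  split_ifs <;> simp

-- A's bucket fold computes the three tier filters, each appended to its accumulator.
theorem pv_fold_buckets (terms : List String) (xs : List String) :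
    ∀ (h m l : List String),
      xs.foldl
        (fun (acc : List String × List String × List String) query =>
          let query_lower := PySem.Str.lower query
          if terms.any (fun word => PySem.Str.isIn word query_lower) then
            (acc.1 ++ [query], acc.2.1, acc.2.2)
          else if (["current", "latest", "today", "2025", "alert", "emergency"]).any
               (fun word => PySem.Str.isIn word query_lower) then
            (acc.1, acc.2.1 ++ [query], acc.2.2)
          else
            (acc.1, acc.2.1, acc.2.2 ++ [query]))
        (h, m, l)
      = (h ++ xs.filter (fun q => pvTier terms q == 0),
         m ++ xs.filter (fun q => pvTier terms q == 1),
         l ++ xs.filter (fun q => pvTier terms q == 2)) := by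
  induction xs with
  | nil => intro h m l; simp
  | cons x xs ih =>
    intro h m l
    simp only [List.foldl_cons]
    by_cases h0 : terms.any (fun word => PySem.Str.isIn word (PySem.Str.lower x)) = true
    · have ht : pvTier terms x = 0 := by unfold pvTier; rw [if_pos h0]
      simp only [h0, if_true, ih]
      simp [ht]
    · by_cases h1 : (["current", "latest", "today", "2025", "alert", "emergency"]).any
          (fun word => PySem.Str.isIn word (PySem.Str.lower x)) = true
      · have ht : pvTier terms x = 1 := by unfold pvTier; rw [if_neg h0, if_pos h1]
        simp only [h0, h1, Bool.false_eq_true, if_false, if_true, ih]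
        simp [ht]
      · have ht : pvTier terms x = 2 := by unfold pvTier; rw [if_neg h0, if_neg h1]
        simp only [h0, h1, Bool.false_eq_true, if_false, ih]
        simp [ht]

-- ===== VERDICT (by name: the statement is the Claim_ definition above) =====
theorem prioritize_search_queries_py_spec : Claim_equal_prioritize_search_queries_py := by
  intro queries original_query _
  unfold Spec_prioritize_search_queries_py prioritize_search_queries_py prioritize_search_queries_py_alt
  set terms := (PySem.Str.split₀ original_query).filter (fun w => decide (3 < PySem.Str.len w)) with hterms
  rw [pv_sorted_tier (pvTier terms) (pvTier_range terms) queries]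
  have := pv_fold_buckets terms queries [] [] []
  simp only [List.nil_append] at this
  simp only [this]
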